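-- pv_equiv track=rewrite | github.com/fluffybeing/parinx | parinx/parser.py | split_docstring
-- ===== SOURCE A (Python) =====
-- _SUPPORTED_FIELDS = set([
--     ':param', ':parameter',
--     ':arg', ':argument',
--     ':example:', ':Example:',
--     ':type',
--     ':key', ':keyword',
--     ':rtype:',
--     '@inherits:',
--     ':raises',
--     ':return:', ':returns:',
-- ])
--
-- def split_docstring(docstring):
--     """
--     Separates the method's description and parameter's
--
--     The assumption is that all of the field definitions appear
--     at the end of the docstring.
--
--     :return: Return description string and list of fields strings
--     """
--     switched_to_fields = False
--     description_list, fields_list = [], []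
--
--     for line in [_.strip() for _ in docstring.split('\n') if _.strip()]:
--         # Once we find the first field tag, switch to the fields list.
--         if line.startswith(tuple(_SUPPORTED_FIELDS)):
--             switched_to_fields = True
--
--         # If we switched to the fields list, but not looking at a field marker,
--         # append to the previous line.
--         elif switched_to_fields and not line.startswith(tuple(_SUPPORTED_FIELDS)):
--             if fields_list[-1].lower().startswith(':example:'):
--                 fields_list[-1] += ('\n' + line.lstrip('>>>').strip())
--             else:
--                 fields_list[-1] += (' ' + line)
--             continue
--
--         if switched_to_fields:
--             fields_list.append(line)
--         else:
--             description_list.append(line)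
--
--     description = ' '.join(description_list).strip()
--     return description, fields_list
-- ===== SOURCE B (Python) =====
-- _SUPPORTED_FIELDS = set([
--     ':param', ':parameter',
--     ':arg', ':argument',
--     ':example:', ':Example:',
--     ':type',
--     ':key', ':keyword',
--     ':rtype:',
--     '@inherits:',
--     ':raises',
--     ':return:', ':returns:',
-- ])
--
-- _MARKERS = tuple(_SUPPORTED_FIELDS)
--
--
-- def _render(head, conts):
--     # The accumulated field always keeps its marker line as prefix, so the
--     # ':example:' check can be made once, on the head line of the group.
--     if head.lower().startswith(':example:'):
--         return head + ''.join('\n' + c.lstrip('>>>').strip() for c in conts)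
--     return ' '.join([head] + conts)
--
--
-- def split_docstring(docstring):
--     """
--     Separates the method's description and parameter's
--
--     :return: Return description string and list of fields strings
--     """
--     lines = [s for s in (l.strip() for l in docstring.split('\n')) if s]
--     n = len(lines)
--     i = 0
--     while i < n and not lines[i].startswith(_MARKERS):
--         i += 1
--     description = ' '.join(lines[:i]).strip()
--     # Group the field region into (marker line, continuation lines) chunks,
--     # then render each chunk independently.
--     groups = []
--     for line in lines[i:]:
--         if line.startswith(_MARKERS):
--             groups.append((line, []))
--         else:
--             groups[-1][1].append(line)
--     return description, [_render(h, cs) for h, cs in groups]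
-- ===== Notes on version B (the rewrite author's own statement) =====
-- stated objective: alternative
-- what changed: Instead of A's single stateful pass (a switched flag and in-place mutation of the last field string, re-testing each accumulated field for the example marker), B splits the cleaned lines at the first field marker, groups the field region into (marker, continuation-lines) chunks, and renders each chunk once, which is sound because the example-marker test only depends on the chunk's head line.
import Mathlib
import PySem

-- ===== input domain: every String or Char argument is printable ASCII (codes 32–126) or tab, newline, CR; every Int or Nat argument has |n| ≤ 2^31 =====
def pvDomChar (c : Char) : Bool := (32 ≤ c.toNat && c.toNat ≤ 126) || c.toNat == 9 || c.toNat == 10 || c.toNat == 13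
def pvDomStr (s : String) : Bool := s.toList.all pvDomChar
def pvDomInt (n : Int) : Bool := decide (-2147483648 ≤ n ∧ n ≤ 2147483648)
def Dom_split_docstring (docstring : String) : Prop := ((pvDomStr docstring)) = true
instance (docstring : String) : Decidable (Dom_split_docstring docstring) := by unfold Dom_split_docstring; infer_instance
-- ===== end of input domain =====

-- B splits the cleaned lines at the first field marker, groups the field region into
-- (marker, continuations) chunks and renders each chunk once, instead of A's single
-- stateful pass mutating the last field string (objective: alternative decomposition).


-- shared module constant _SUPPORTED_FIELDS (only membership in the tuple matters, so a list is exact)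
def pvMarkers : List String :=
  [":param", ":parameter", ":arg", ":argument", ":example:", ":Example:", ":type",
   ":key", ":keyword", ":rtype:", "@inherits:", ":raises", ":return:", ":returns:"]

-- line.startswith(tuple(_SUPPORTED_FIELDS)) (both Pythons use the same module constant)
def pvIsField (line : String) : Bool := pvMarkers.any (fun m => PySem.Str.startswith line m)

-- line.lstrip('>>>'): hand port (PySem has no lstrip-with-chars); exact, the char set is {'>'}
def pvLstripGt (line : String) : String := String.ofList (line.toList.dropWhile (fun c => c == '>'))

-- ===== PORT A =====
-- fields_list[-1] += '\n' + line.lstrip('>>>').strip()  /  fields_list[-1] += ' ' + line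
def pvAugment (last line : String) : String :=
  if PySem.Str.startswith (PySem.Str.lower last) ":example:" then
    last ++ ("\n" ++ PySem.Str.strip (pvLstripGt line))
  else
    last ++ (" " ++ line)

-- the in-place update of fields_list[-1] ([] is unreachable: A reads fields_list[-1] only once switched, and switching pushed a line)
def pvAppendLast : List String → String → List String
  | [], _ => []
  | [f], line => [pvAugment f line]
  | f :: g :: fs, line => f :: pvAppendLast (g :: fs) line

-- one iteration of A's for-loop over the state (switched_to_fields, description_list, fields_list)
def pvStepA (st : Bool × List String × List String) (line : String) : Bool × List String × List String :=
  if pvIsField line then (true, st.2.1, st.2.2 ++ [line])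
  else if st.1 then (st.1, st.2.1, pvAppendLast st.2.2 line)
  else (st.1, st.2.1 ++ [line], st.2.2)

def split_docstring (docstring : String) : String × List String :=
  let lines := ((PySem.Str.split? docstring "\n").getD []).filterMap
    (fun l => let s := PySem.Str.strip l; if s = "" then none else some s)
  let st := lines.foldl pvStepA (false, [], [])
  (PySem.Str.strip (PySem.Str.join " " st.2.1), st.2.2)

-- ===== PORT B =====
-- _render(head, conts)
def pvRender (head : String) (conts : List String) : String :=
  if PySem.Str.startswith (PySem.Str.lower head) ":example:" then
    head ++ PySem.Str.join "" (conts.map (fun c => "\n" ++ PySem.Str.strip (pvLstripGt c)))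
  else
    PySem.Str.join " " (head :: conts)

-- groups[-1][1].append(line) ([] is unreachable: the field region starts at a marker line)
def pvAddCont : List (String × List String) → String → List (String × List String)
  | [], _ => []
  | [(h, cs)], line => [(h, cs ++ [line])]
  | g :: g' :: gs, line => g :: pvAddCont (g' :: gs) line

-- one iteration of B's grouping loop
def pvStepB (groups : List (String × List String)) (line : String) : List (String × List String) :=
  if pvIsField line then groups ++ [(line, [])] else pvAddCont groups line

def split_docstring_alt (docstring : String) : String × List String :=
  let lines := (((PySem.Str.split? docstring "\n").getD []).map PySem.Str.strip).filter (fun s => s ≠ "")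
  -- the while loop locating the first marker, and the two slices lines[:i] / lines[i:]
  let descLines := lines.takeWhile (fun l => !pvIsField l)
  let rest := lines.dropWhile (fun l => !pvIsField l)
  let groups := rest.foldl pvStepB []
  (PySem.Str.strip (PySem.Str.join " " descLines), groups.map (fun g => pvRender g.1 g.2))

-- ===== PRECONDITION & SPEC =====
def Spec_split_docstring (docstring : String) (out : String × List String) : Prop := out = split_docstring_alt docstring
instance (docstring : String) (out : String × List String) : Decidable (Spec_split_docstring docstring out) := by unfold Spec_split_docstring; infer_instance

-- ===== CLAIM (what is proved, stated in full; the proofs are below) =====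
def Claim_equal_split_docstring : Prop := ∀ (docstring : String), Dom_split_docstring docstring → Spec_split_docstring docstring (split_docstring docstring)

-- ===== LEMMAS AND PROOFS =====

-- A's comprehension and B's map+filter clean the lines identically
theorem pv_clean_eq (ls : List String) :
    ls.filterMap (fun l => let s := PySem.Str.strip l; if s = "" then none else some s)
      = (ls.map PySem.Str.strip).filter (fun s => s ≠ "") := by
  induction ls with
  | nil => rfl
  | cons l ls ih =>
    by_cases h : PySem.Str.strip l = "" <;> simp [h, ih]

theorem pv_cjoin_append (sep : List Char) (ps : List (List Char)) (q : List Char) (h : ps ≠ []) :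
    PySem.Chars.join sep (ps ++ [q]) = PySem.Chars.join sep ps ++ sep ++ q := by
  induction ps with
  | nil => exact absurd rfl h
  | cons a ps ih =>
    cases ps with
    | nil => simp [PySem.Chars.join_cons_cons, PySem.Chars.join_singleton]
    | cons b rest =>
      rw [List.cons_append, PySem.Chars.join_cons_cons, List.cons_append] at *
      rw [PySem.Chars.join_cons_cons, ih (by simp)]
      simp [List.append_assoc]

theorem pv_join_append (sep y : String) (xs : List String) (hxs : xs ≠ []) :
    PySem.Str.join sep (xs ++ [y]) = PySem.Str.join sep xs ++ sep ++ y := by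
  rw [← String.toList_inj]
  simp only [PySem.Str.join, String.toList_append, String.toList_ofList, List.map_append,
    List.map_cons, List.map_nil]
  exact pv_cjoin_append _ _ _ (by simpa using hxs)

theorem pv_join_nil_append (y : String) (xs : List String) :
    PySem.Str.join "" (xs ++ [y]) = PySem.Str.join "" xs ++ y := by
  cases xs with
  | nil =>
    rw [← String.toList_inj]
    simp [PySem.Str.join, PySem.Chars.join_singleton, PySem.Chars.join_nil]
  | cons a rest =>
    have := pv_join_append "" y (a :: rest) (by simp)
    rw [this, String.append_empty]

theorem pv_join_cons (h c : String) (rest : List String) :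
    PySem.Str.join " " (h :: c :: rest) = h ++ (" " ++ PySem.Str.join " " (c :: rest)) := by
  rw [← String.toList_inj]
  simp [PySem.Str.join, PySem.Chars.join_cons_cons, List.append_assoc]

theorem pv_join_singleton (h : String) : PySem.Str.join " " [h] = h := by
  rw [← String.toList_inj]
  simp [PySem.Str.join, PySem.Chars.join_singleton]

theorem pv_render_nil (h : String) : pvRender h [] = h := by
  unfold pvRender
  split <;> rw [← String.toList_inj] <;>
    simp [PySem.Str.join, PySem.Chars.join_nil, PySem.Chars.join_singleton]

-- every supported marker is ≥ 2 chars, and only the two example markers have 'e' at index 1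
theorem pv_markers_fact : ∀ m ∈ pvMarkers,
    2 ≤ m.toList.length ∧ ((m.toList[1]?.map PySem.Chars.lowerChar = some 'e') → 9 ≤ m.toList.length) := by
  decide

theorem pv_get1_of_prefix_example (l : List Char) (hp : (":example:" : String).toList <+: l) :
    l[1]? = some 'e' := by
  obtain ⟨r, hr⟩ := hp
  rw [← hr, List.getElem?_append_left (by decide)]
  decide

-- the example-marker test on an accumulated field only depends on its marker-line prefix
theorem pv_example_check_append (h t : String) (hf : pvIsField h = true) :
    PySem.Str.startswith (PySem.Str.lower (h ++ t)) ":example:"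
      = PySem.Str.startswith (PySem.Str.lower h) ":example:" := by
  obtain ⟨m, hm, hsw⟩ := List.any_eq_true.mp hf
  rw [PySem.Str.startswith_eq] at hsw
  have hpre : m.toList <+: h.toList := List.isPrefixOf_iff_prefix.mp hsw
  obtain ⟨hm2, hm9⟩ := pv_markers_fact m hm
  have hlen2 : 2 ≤ h.toList.length := le_trans hm2 hpre.length_le
  have hchar : h.toList[1]? = m.toList[1]? := by
    obtain ⟨r, hr⟩ := hpre
    rw [← hr, List.getElem?_append_left (by omega)]
  rw [PySem.Str.startswith_eq, PySem.Str.startswith_eq, Bool.eq_iff_iff]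
  simp only [PySem.Str.toList_lower, String.toList_append, PySem.Chars.startswith,
    List.isPrefixOf_iff_prefix, PySem.Chars.lower, List.map_append]
  constructor
  · intro hp
    by_cases he : h.toList[1]?.map PySem.Chars.lowerChar = some 'e'
    · have h9 : 9 ≤ h.toList.length := le_trans (hm9 (hchar ▸ he)) hpre.length_le
      exact (List.isPrefix_append_of_length (by simpa using (le_trans (by decide) h9))).mp hp
    · exfalso
      have h1 := pv_get1_of_prefix_example _ hp
      rw [List.getElem?_append_left (by simpa using (by omega : 1 < h.toList.length)),
        List.getElem?_map] at h1
      exact he h1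
  · intro hp
    exact List.prefix_append_of_prefix hp

-- A's in-place growth of the last field is B's render of the grown chunk
theorem pv_augment_render (h line : String) (cs : List String) (hf : pvIsField h = true) :
    pvAugment (pvRender h cs) line = pvRender h (cs ++ [line]) := by
  by_cases hb : PySem.Str.startswith (PySem.Str.lower h) ":example:" = true
  · rw [pvRender, if_pos hb, pvAugment,
      if_pos (by rw [pv_example_check_append h _ hf]; exact hb)]
    rw [pvRender, if_pos hb, List.map_append, List.map_cons, List.map_nil,
      pv_join_nil_append]
    simp [String.append_assoc]
  · rw [pvRender, if_neg hb]
    have hform : ∃ t, PySem.Str.join " " (h :: cs) = h ++ t := by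
      cases cs with
      | nil => exact ⟨"", by rw [pv_join_singleton, String.append_empty]⟩
      | cons c rest => exact ⟨_, pv_join_cons h c rest⟩
    obtain ⟨t, ht⟩ := hform
    have hchk : PySem.Str.startswith (PySem.Str.lower (PySem.Str.join " " (h :: cs))) ":example:" = false := by
      rw [ht, pv_example_check_append h t hf]
      exact Bool.not_eq_true _ ▸ (by simpa using hb)
    rw [pvAugment, if_neg (by simp only [hchk]; exact Bool.false_ne_true), pvRender, if_neg hb]
    rw [show h :: (cs ++ [line]) = (h :: cs) ++ [line] from rfl,
      pv_join_append " " line (h :: cs) (by simp), String.append_assoc]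

theorem pv_appendLast_render (gs : List (String × List String)) (line : String)
    (hne : gs ≠ []) (hheads : ∀ g ∈ gs, pvIsField g.1 = true) :
    pvAppendLast (gs.map (fun g => pvRender g.1 g.2)) line
      = (pvAddCont gs line).map (fun g => pvRender g.1 g.2) := by
  induction gs with
  | nil => exact absurd rfl hne
  | cons g gs ih =>
    cases gs with
    | nil =>
      obtain ⟨h, cs⟩ := g
      simp only [List.map_cons, List.map_nil, pvAppendLast, pvAddCont]
      rw [pv_augment_render h line cs (hheads (h, cs) (by simp))]
    | cons g' rest =>
      simp only [List.map_cons, pvAppendLast, pvAddCont]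
      have := ih (by simp) (fun x hx => hheads x (List.mem_cons_of_mem _ hx))
      simp only [List.map_cons] at this
      rw [this]

theorem pv_addCont_ne (gs : List (String × List String)) (line : String) (hne : gs ≠ []) :
    pvAddCont gs line ≠ [] := by
  cases gs with
  | nil => exact absurd rfl hne
  | cons g gs =>
    cases gs with
    | nil => obtain ⟨h, cs⟩ := g; simp [pvAddCont]
    | cons g' rest => simp [pvAddCont]

theorem pv_addCont_heads (gs : List (String × List String)) (line : String)
    (hheads : ∀ g ∈ gs, pvIsField g.1 = true) :
    ∀ g ∈ pvAddCont gs line, pvIsField g.1 = true := by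
  induction gs with
  | nil => simp [pvAddCont]
  | cons g gs ih =>
    cases gs with
    | nil =>
      obtain ⟨h, cs⟩ := g
      intro x hx
      simp only [pvAddCont, List.mem_singleton] at hx
      subst hx
      exact hheads (h, cs) (by simp)
    | cons g' rest =>
      intro x hx
      simp only [pvAddCont, List.mem_cons] at hx
      rcases hx with hx | hx
      · exact hheads x (by simp [hx])
      · exact ih (fun y hy => hheads y (List.mem_cons_of_mem _ hy)) x hx

-- once switched, A's fold renders exactly B's groups
theorem pv_fold_fields (ls : List String) (d : List String) (gs : List (String × List String))
    (hne : gs ≠ []) (hheads : ∀ g ∈ gs, pvIsField g.1 = true) :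
    ls.foldl pvStepA (true, d, gs.map (fun g => pvRender g.1 g.2))
      = (true, d, (ls.foldl pvStepB gs).map (fun g => pvRender g.1 g.2)) := by
  induction ls generalizing gs with
  | nil => rfl
  | cons l ls ih =>
    rw [List.foldl_cons, List.foldl_cons]
    by_cases hl : pvIsField l = true
    · have h1 : pvStepA (true, d, gs.map (fun g => pvRender g.1 g.2)) l
          = (true, d, (gs ++ [((l : String), ([] : List String))]).map (fun g => pvRender g.1 g.2)) := by
        simp [pvStepA, hl, pv_render_nil]
      have h2 : pvStepB gs l = gs ++ [((l : String), ([] : List String))] := by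
        simp [pvStepB, hl]
      rw [h1, h2]
      exact ih (gs ++ [(l, [])]) (by simp)
        (by intro x hx
            rcases List.mem_append.mp hx with hx | hx
            · exact hheads x hx
            · simp only [List.mem_singleton] at hx; subst hx; exact hl)
    · have h1 : pvStepA (true, d, gs.map (fun g => pvRender g.1 g.2)) l
          = (true, d, (pvAddCont gs l).map (fun g => pvRender g.1 g.2)) := by
        simp only [pvStepA, hl, if_false, if_true, Bool.false_eq_true]
        rw [pv_appendLast_render gs l hne hheads]
      have h2 : pvStepB gs l = pvAddCont gs l := by simp [pvStepB, hl]
      rw [h1, h2]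
      exact ih (pvAddCont gs l) (pv_addCont_ne gs l hne) (pv_addCont_heads gs l hheads)

-- before the first marker, A only accumulates description lines
theorem pv_desc_phase (ls : List String) (d : List String) :
    ls.foldl pvStepA (false, d, []) =
      (match ls.dropWhile (fun l => !pvIsField l) with
       | [] => (false, d ++ ls, [])
       | l :: rest => rest.foldl pvStepA (true, d ++ ls.takeWhile (fun l => !pvIsField l), [l])) := by
  induction ls generalizing d with
  | nil => simp
  | cons l ls ih =>
    rw [List.foldl_cons]
    by_cases hl : pvIsField l = true
    · rw [show pvStepA (false, d, []) l = (true, d, [l]) from by simp [pvStepA, hl]]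
      simp [hl]
    · rw [show pvStepA (false, d, []) l = (false, d ++ [l], []) from by simp [pvStepA, hl]]
      rw [ih (d ++ [l])]
      simp only [List.dropWhile_cons, List.takeWhile_cons, hl]
      cases hdrop : ls.dropWhile (fun l => !pvIsField l) with
      | nil => simp [List.append_assoc]
      | cons l' rest => simp [List.append_assoc]

-- ===== VERDICT (by name: the statement is the Claim_ definition above) =====
theorem split_docstring_spec : Claim_equal_split_docstring := by
  intro docstring _
  unfold Spec_split_docstring split_docstring split_docstring_alt
  rw [pv_clean_eq]
  dsimp only
  set lines := ((((PySem.Str.split? docstring "\n").getD []).map PySem.Str.strip).filter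
    (fun s => s ≠ "")) with hlines
  rw [pv_desc_phase lines []]
  cases hdrop : lines.dropWhile (fun l => !pvIsField l) with
  | nil =>
    have htk : lines.takeWhile (fun l => !pvIsField l) = lines := by
      have := List.takeWhile_append_dropWhile (p := fun l => !pvIsField l) (l := lines)
      rw [hdrop, List.append_nil] at this
      exact this
    simp [htk]
  | cons l rest =>
    have hl : pvIsField l = true := by
      have hne : lines.dropWhile (fun l => !pvIsField l) ≠ [] := by simp [hdrop]
      have h' := List.head_dropWhile_not (fun l => !pvIsField l) hne
      simp only [hdrop, List.head_cons] at h'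
      simpa using h'
    have hmap : ([((l : String), ([] : List String))].map (fun g => pvRender g.1 g.2)) = [l] := by
      simp [pv_render_nil]
    have hfold := pv_fold_fields rest ([] ++ lines.takeWhile (fun l => !pvIsField l))
      [(l, [])] (by simp)
      (by intro x hx; simp only [List.mem_singleton] at hx; subst hx; exact hl)
    rw [hmap] at hfold
    dsimp only
    rw [hfold, List.foldl_cons, show pvStepB [] l = [((l : String), ([] : List String))] from by
      simp [pvStepB, hl]]
    simp
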